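-- pv_equiv track=rewrite | github.com/audio-visual/TalkingVideo | syncnet_python/syncnet_postprocess.py | modify_segments
-- ===== SOURCE A (Python) =====
-- def modify_segments(segments, threshold=15, min_length=75):
--     modified_segments = []
--     if len(segments)<1:
--         return modified_segments
--     current_start, current_end = segments[0]
--
--     for start, end in segments[1:]:
--         if start - current_end <= threshold:
--             current_end = end  # Extend the current segment
--         else:
--             # Add the current segment to the list and start a new one
--             if current_end - current_start >= min_length:
--                 modified_segments.append((current_start, current_end))
--             current_start, current_end = start, end
--
--     # Add the last segment
--     if current_end - current_start >= min_length:
--         modified_segments.append((current_start, current_end))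
--
--     return modified_segments
-- ===== SOURCE B (Python) =====
-- def modify_segments(segments, threshold=15, min_length=75):
--     # Recursive run-splitting: find each maximal mergeable run, emit its span,
--     # recurse on the remainder.  No running current-segment/accumulator state.
--     def split_run(prev_end, rest):
--         # Consume the run whose gaps to the previous end stay within threshold;
--         # return (end of the run, untouched remainder).
--         if rest and rest[0][0] - prev_end <= threshold:
--             return split_run(rest[0][1], rest[1:])
--         return prev_end, rest
--
--     def go(rest):
--         if not rest:
--             return []
--         (s, e0) = rest[0]
--         e, rem = split_run(e0, rest[1:])
--         head = [(s, e)] if e - s >= min_length else []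
--         return head + go(rem)
--
--     return go(segments)
-- ===== Notes on version B (the rewrite author's own statement) =====
-- stated objective: alternative
-- what changed: B replaces A's stateful accumulator loop with recursive run-splitting: a helper consumes one maximal mergeable run and returns its end plus the remainder, and the driver emits each run's span (length-checked) and recurses on the remainder, building the output by concatenation of recursive results.
import Mathlib
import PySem

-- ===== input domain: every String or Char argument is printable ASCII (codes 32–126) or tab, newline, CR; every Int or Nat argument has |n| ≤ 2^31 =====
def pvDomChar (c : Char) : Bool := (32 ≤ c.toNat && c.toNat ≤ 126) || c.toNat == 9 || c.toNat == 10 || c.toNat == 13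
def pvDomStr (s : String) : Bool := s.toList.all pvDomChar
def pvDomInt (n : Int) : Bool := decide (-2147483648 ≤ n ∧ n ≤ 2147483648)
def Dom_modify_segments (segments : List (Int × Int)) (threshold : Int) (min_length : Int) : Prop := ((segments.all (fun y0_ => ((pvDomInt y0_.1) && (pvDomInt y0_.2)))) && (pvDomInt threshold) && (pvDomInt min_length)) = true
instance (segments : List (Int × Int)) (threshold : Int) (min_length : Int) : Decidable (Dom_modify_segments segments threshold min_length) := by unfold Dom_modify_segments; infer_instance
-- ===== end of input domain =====

-- B replaces A's stateful accumulator loop with recursive run-splitting (alternative decomposition; return values proved equal).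


-- ===== PORT A =====
-- A's loop: state (current_start, current_end, modified_segments); appends segments
-- passing the min_length test as it goes, and appends the last segment after the loop.
def modify_segments (segments : List (Int × Int)) (threshold : Int) (min_length : Int) : List (Int × Int) :=
  match segments with
  | [] => []
  | (s0, e0) :: rest =>
    let st := rest.foldl
      (fun (st : Int × Int × List (Int × Int)) (p : Int × Int) =>
        if p.1 - st.2.1 <= threshold then (st.1, p.2, st.2.2)
        else (p.1, p.2, if st.2.1 - st.1 >= min_length then st.2.2 ++ [(st.1, st.2.1)] else st.2.2))
      (s0, e0, [])
    if st.2.1 - st.1 >= min_length then st.2.2 ++ [(st.1, st.2.1)] else st.2.2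

-- ===== PORT B =====
-- B's split_run: consume the run whose gaps stay within threshold; return (run end, remainder).
def msSplitRun (threshold : Int) (prev_end : Int) (rest : List (Int × Int)) : Int × List (Int × Int) :=
  match rest with
  | (s, e) :: t => if s - prev_end <= threshold then msSplitRun threshold e t else (prev_end, rest)
  | [] => (prev_end, [])

-- needed by msGo's decreasing_by
theorem msSplitRun_len_le (threshold : Int) : forall (pe : Int) (rest : List (Int × Int)),
    (msSplitRun threshold pe rest).2.length <= rest.length := by
  intro pe rest
  induction rest generalizing pe with
  | nil => simp [msSplitRun]
  | cons p t ih =>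
    obtain ⟨s, e⟩ := p
    simp only [msSplitRun]
    split
    · exact le_trans (ih e) (Nat.le_succ _)
    · exact le_refl _

-- B's go: emit the span of the first maximal run (if long enough) and recurse on the remainder.
def msGo (threshold min_length : Int) (rest : List (Int × Int)) : List (Int × Int) :=
  match rest with
  | [] => []
  | (s, e0) :: tail =>
    let p := msSplitRun threshold e0 tail
    (if p.1 - s >= min_length then [(s, p.1)] else []) ++ msGo threshold min_length p.2
termination_by rest.length
decreasing_by
  exact Nat.lt_succ_of_le (msSplitRun_len_le threshold e0 tail)

def modify_segments_alt (segments : List (Int × Int)) (threshold : Int) (min_length : Int) : List (Int × Int) :=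
  msGo threshold min_length segments

-- ===== PRECONDITION & SPEC =====
def Spec_modify_segments (segments : List (Int × Int)) (threshold : Int) (min_length : Int) (out : List (Int × Int)) : Prop := out = modify_segments_alt segments threshold min_length
instance (segments : List (Int × Int)) (threshold : Int) (min_length : Int) (out : List (Int × Int)) : Decidable (Spec_modify_segments segments threshold min_length out) := by unfold Spec_modify_segments; infer_instance

-- ===== CLAIM (what is proved, stated in full; the proofs are below) =====
def Claim_equal_modify_segments : Prop := ∀ (segments : List (Int × Int)) (threshold : Int) (min_length : Int), Dom_modify_segments segments threshold min_length → Spec_modify_segments segments threshold min_length (modify_segments segments threshold min_length)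

-- ===== LEMMAS AND PROOFS =====

-- Invariant: finishing A's fold from (cs, ce, acc) yields acc ++ B's recursion on (cs, ce) :: rest.
theorem ms_fold_go (threshold min_length : Int) :
    forall (rest : List (Int × Int)) (cs ce : Int) (acc : List (Int × Int)),
      (let st := rest.foldl
          (fun (st : Int × Int × List (Int × Int)) (p : Int × Int) =>
            if p.1 - st.2.1 <= threshold then (st.1, p.2, st.2.2)
            else (p.1, p.2, if st.2.1 - st.1 >= min_length then st.2.2 ++ [(st.1, st.2.1)] else st.2.2))
          (cs, ce, acc)
       if st.2.1 - st.1 >= min_length then st.2.2 ++ [(st.1, st.2.1)] else st.2.2)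
      = acc ++ msGo threshold min_length ((cs, ce) :: rest) := by
  intro rest
  induction rest with
  | nil =>
    intro cs ce acc
    simp only [List.foldl_nil, msGo, msSplitRun]
    by_cases h : ce - cs >= min_length <;> simp [h]
  | cons p t ih =>
    intro cs ce acc
    obtain ⟨s, e⟩ := p
    simp only [List.foldl_cons]
    by_cases hth : s - ce <= threshold
    · simp only [hth, if_pos]
      rw [ih cs e acc]
      congr 1
      simp [msGo, msSplitRun, hth]
    · simp only [hth, if_neg, not_false_iff]
      rw [ih s e _]
      have hgo : msGo threshold min_length ((cs, ce) :: (s, e) :: t)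
          = (if ce - cs >= min_length then [(cs, ce)] else []) ++ msGo threshold min_length ((s, e) :: t) := by
        simp [msGo, msSplitRun, hth]
      rw [hgo]
      by_cases hlen : ce - cs >= min_length <;> simp [hlen]

-- ===== VERDICT (by name: the statement is the Claim_ definition above) =====
theorem modify_segments_spec : Claim_equal_modify_segments := by
  intro segments threshold min_length _
  unfold Spec_modify_segments modify_segments modify_segments_alt
  match segments with
  | [] => simp [msGo]
  | (s0, e0) :: rest =>
    simpa using ms_fold_go threshold min_length rest s0 e0 []
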